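-- pv_equiv track=rewrite | github.com/TariniS/calcudoku_Project3_CS | Project 3/solverFuncs.py | checkAllCages
-- ===== SOURCE A (Python) =====
-- def checkAllCages(cages,puzzle):
--     booleanVar= True
--     for i in range (len(cages)): #goes through the array of arrays of cages, #small array is the smaller array in the bigger array
--             totalSum=0
--             numOfCells = cages[i][1]
--             valueOfPuzzleNum=0
--             for r in range(int(numOfCells)):
--                 #goes the length of the 2nd value
--                 columnIndex =(int(cages[i][r+2]))%5
--                 rowIndex =(int(cages[i][r+2]))//5
--                 #creates the row index and column index based off the r+2 value
--                 #that is the value were the indexes start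
--                 puzzleNum = int(puzzle[rowIndex][columnIndex])
--                 totalSum = totalSum +puzzleNum
--                 if(puzzleNum==0):#accounting for 0's to be valid
--                     valueOfPuzzleNum+=1
--             if valueOfPuzzleNum<=0:
--                 if cages[i][0]!=totalSum: #for the fully filled cage
--                     booleanVar=False
--
--     return booleanVar
-- ===== SOURCE B (Python) =====
-- def checkAllCages(cages, puzzle):
--     remaining = list(cages)
--     while remaining:
--         cage = remaining.pop()
--         s = 0
--         for r in range(int(cage[1])):
--             code = int(cage[r + 2])
--             v = int(puzzle[code // 5][code % 5])
--             if v == 0: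
--                 break
--             s += v
--         else:
--             if s != cage[0]:
--                 return False
--     return True
-- ===== Notes on version B (the rewrite author's own statement) =====
-- stated objective: alternative
-- what changed: Replaces A's index-driven double loop with a flag/running-sum/zero-counter state by a worklist: a copied stack of cages popped back-to-front in a while loop, each cage scanned with break-on-first-zero (for/else) instead of counting zeros, and an early 'return False' on the first fully-filled mismatching cage instead of a flag carried to the end.
import Mathlib
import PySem

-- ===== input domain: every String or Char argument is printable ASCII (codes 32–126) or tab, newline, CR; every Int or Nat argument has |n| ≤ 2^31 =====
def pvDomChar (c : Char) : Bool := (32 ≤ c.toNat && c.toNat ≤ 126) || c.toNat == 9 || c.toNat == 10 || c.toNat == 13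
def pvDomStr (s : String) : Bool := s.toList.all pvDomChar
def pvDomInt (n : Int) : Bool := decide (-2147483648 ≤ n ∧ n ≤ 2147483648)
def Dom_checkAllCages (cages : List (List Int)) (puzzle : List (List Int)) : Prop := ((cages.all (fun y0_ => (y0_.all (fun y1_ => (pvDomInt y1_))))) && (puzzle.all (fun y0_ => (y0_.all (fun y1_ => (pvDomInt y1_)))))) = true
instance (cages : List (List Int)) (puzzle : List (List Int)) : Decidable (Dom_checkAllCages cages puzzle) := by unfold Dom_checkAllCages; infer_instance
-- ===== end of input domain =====

-- B replaces A's flag/running-sum/zero-counter double loop by a worklist: a stack of cages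
-- popped back-to-front, each cage scanned with break-on-first-zero and an early
-- 'return False' on the first fully-filled mismatching cage; objective: alternative.


-- ===== PORT A =====
-- the body of A's outer loop for one cage (inner loop state = (totalSum, valueOfPuzzleNum))
def checkAllCagesBody (puzzle : List (List Int)) (booleanVar : Bool) (cage : List Int) : Bool :=
  let numOfCells := PySem.List.pyGetD cage 1 0
  let st :=
    (PySem.List.pyRange 0 numOfCells 1).foldl (fun (st : Int × Int) r =>
      let columnIndex := PySem.Int.mod (PySem.List.pyGetD cage (r + 2) 0) 5
      let rowIndex := PySem.Int.floordiv (PySem.List.pyGetD cage (r + 2) 0) 5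
      let puzzleNum := PySem.List.pyGetD (PySem.List.pyGetD puzzle rowIndex []) columnIndex 0
      (st.1 + puzzleNum, if puzzleNum == 0 then st.2 + 1 else st.2)) ((0 : Int), (0 : Int))
  if st.2 ≤ 0 then
    (if PySem.List.pyGetD cage 0 0 ≠ st.1 then false else booleanVar)
  else booleanVar

def checkAllCages (cages : List (List Int)) (puzzle : List (List Int)) : Bool :=
  (PySem.List.pyRange 0 (cages.length : Int) 1).foldl
    (fun booleanVar i => checkAllCagesBody puzzle booleanVar (PySem.List.pyGetD cages i []))
    true

-- ===== PORT B =====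
-- B's inner for/else loop: scan the remaining range, break (cage accepted) on a zero cell,
-- else-clause compares the running sum with the target
def cageScan (puzzle : List (List Int)) (cage : List Int) : List Int → Int → Bool
  | [], s => if s ≠ PySem.List.pyGetD cage 0 0 then false else true
  | r :: rs, s =>
      let code := PySem.List.pyGetD cage (r + 2) 0
      let v := PySem.List.pyGetD (PySem.List.pyGetD puzzle (PySem.Int.floordiv code 5) [])
        (PySem.Int.mod code 5) 0
      if v == 0 then true else cageScan puzzle cage rs (s + v)

-- B's while loop over the worklist: pop the last cage, early-return false on a bad cage
def stackLoop (puzzle : List (List Int)) (stack : List (List Int)) : Bool :=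
  match h : PySem.List.pop? stack (-1) with
  | none => true
  | some (cage, rest) =>
      if cageScan puzzle cage (PySem.List.pyRange 0 (PySem.List.pyGetD cage 1 0) 1) 0 then
        stackLoop puzzle rest
      else false
termination_by stack.length
decreasing_by have h2 := PySem.List.length_of_pop?_eq_some stack h; simp at h2; omega

def checkAllCages_alt (cages : List (List Int)) (puzzle : List (List Int)) : Bool :=
  stackLoop puzzle cages

-- ===== PRECONDITION & SPEC =====
-- Pre_ excludes exactly the inputs where A raises IndexError: a cage shorter than 2
-- entries, a cage with fewer than numOfCells cell entries, or a cell code whose decoded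
-- row/column falls outside the puzzle.
def Pre_checkAllCages (cages : List (List Int)) (puzzle : List (List Int)) : Prop :=
  ∀ c ∈ cages, 2 ≤ c.length ∧ ((c.getD 1 0) + 2 ≤ (c.length : Int) ∨ c.getD 1 0 < 0) ∧
    ∀ v ∈ (c.drop 2).take (c.getD 1 0).toNat,
      (-(puzzle.length : Int) ≤ PySem.Int.floordiv v 5 ∧
        PySem.Int.floordiv v 5 < (puzzle.length : Int)) ∧
      PySem.Int.mod v 5 < ((PySem.List.pyGetD puzzle (PySem.Int.floordiv v 5) []).length : Int)
instance (cages : List (List Int)) (puzzle : List (List Int)) : Decidable (Pre_checkAllCages cages puzzle) := by unfold Pre_checkAllCages; infer_instance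

def pvWitness_checkAllCages : List (List Int) × List (List Int) :=
  ([[3, 2, 0, 1], [4, 2, 2, -1]], [[1, 2, 0, 0, 4]])

def Spec_checkAllCages (cages : List (List Int)) (puzzle : List (List Int)) (out : Bool) : Prop := out = checkAllCages_alt cages puzzle
instance (cages : List (List Int)) (puzzle : List (List Int)) (out : Bool) : Decidable (Spec_checkAllCages cages puzzle out) := by unfold Spec_checkAllCages; infer_instance

-- ===== CLAIM (what is proved, stated in full; the proofs are below) =====
def Claim_equal_checkAllCages : Prop := ∀ (cages : List (List Int)) (puzzle : List (List Int)), Dom_checkAllCages cages puzzle → Pre_checkAllCages cages puzzle → Spec_checkAllCages cages puzzle (checkAllCages cages puzzle)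

-- ===== LEMMAS AND PROOFS =====
theorem pvWitness_ok : Dom_checkAllCages pvWitness_checkAllCages.1 pvWitness_checkAllCages.2 ∧
    Pre_checkAllCages pvWitness_checkAllCages.1 pvWitness_checkAllCages.2 := by decide

-- the value one puzzle cell contributes for cell code v
def cellVal (puzzle : List (List Int)) (v : Int) : Int :=
  PySem.List.pyGetD (PySem.List.pyGetD puzzle (PySem.Int.floordiv v 5) []) (PySem.Int.mod v 5) 0

-- the common characterisation both programs are reduced to: one cage passes iff some cell
-- is zero or the cell values sum to the target
def cagePred (puzzle : List (List Int)) (cage : List Int) : Bool :=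
  let values := (PySem.List.pyRange 0 (PySem.List.pyGetD cage 1 0) 1).map (fun r =>
    cellVal puzzle (PySem.List.pyGetD cage (r + 2) 0))
  values.contains 0 || (values.sum == PySem.List.pyGetD cage 0 0)

-- B's for/else scan computes 'a zero occurs, or the accumulated sum reaches the target'
theorem cageScan_eq (puzzle : List (List Int)) (cage : List Int) (l : List Int) :
    ∀ s : Int, cageScan puzzle cage l s =
      ((l.map (fun r => cellVal puzzle (PySem.List.pyGetD cage (r + 2) 0))).contains 0 ||
       (s + (l.map (fun r => cellVal puzzle (PySem.List.pyGetD cage (r + 2) 0))).sum ==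
         PySem.List.pyGetD cage 0 0)) := by
  induction l with
  | nil =>
    intro s
    by_cases h : s = PySem.List.pyGetD cage 0 0 <;> simp [cageScan, h]
  | cons r rs ih =>
    intro s
    simp only [cageScan]
    by_cases h : cellVal puzzle (PySem.List.pyGetD cage (r + 2) 0) = 0
    · rw [if_pos (by simpa [cellVal] using h)]
      have hv : ((0 : Int) == cellVal puzzle (PySem.List.pyGetD cage (r + 2) 0)) = true := by
        simp [h]
      simp only [List.map_cons, List.contains_cons, hv, Bool.true_or]
    · rw [if_neg (by simpa [cellVal] using h), ih]
      have hv : ((0 : Int) == cellVal puzzle (PySem.List.pyGetD cage (r + 2) 0)) = false := by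
        simp only [beq_eq_false_iff_ne, ne_eq]
        exact fun hh => h hh.symm
      simp only [List.map_cons, List.contains_cons, List.sum_cons, hv, Bool.false_or]
      rw [show PySem.List.pyGetD (PySem.List.pyGetD puzzle
            (PySem.Int.floordiv (PySem.List.pyGetD cage (r + 2) 0) 5) [])
            (PySem.Int.mod (PySem.List.pyGetD cage (r + 2) 0) 5) 0
          = cellVal puzzle (PySem.List.pyGetD cage (r + 2) 0) from rfl, add_assoc]

-- one for/else scan, started at 0 over the cage's full range, decides cagePred
theorem cageOK_eq (puzzle : List (List Int)) (x : List Int) :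
    cageScan puzzle x (PySem.List.pyRange 0 (PySem.List.pyGetD x 1 0) 1) 0 =
      cagePred puzzle x := by
  rw [cageScan_eq]
  simp only [cagePred, Int.zero_add]

-- B's worklist loop is the conjunction of cagePred over the stack
theorem stackLoop_eq_all (puzzle : List (List Int)) (stack : List (List Int)) :
    stackLoop puzzle stack = stack.all (cagePred puzzle) := by
  induction stack using List.reverseRecOn with
  | nil =>
    rw [stackLoop.eq_def]
    split
    · rfl
    · next h => simp [PySem.List.pop?, PySem.List.pyIdx?] at h
  | append_singleton xs x ih =>
    rw [stackLoop.eq_def]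
    split
    · next h => rw [PySem.List.pop?_last] at h; exact absurd h (by simp)
    · next a rest h =>
      rw [PySem.List.pop?_last] at h
      simp only [Option.some.injEq, Prod.mk.injEq] at h
      obtain ⟨rfl, rfl⟩ := h
      rw [cageOK_eq]
      by_cases hc : cagePred puzzle x
      · rw [if_pos hc, ih]
        simp [hc]
      · rw [if_neg hc]
        simp [hc]

-- reading cell r+2 of the cage is reading the r-th element behind the two header entries
theorem pyGetD_drop2 (c : List Int) (m : Nat) (hm : m + 2 < c.length) :
    PySem.List.pyGetD c ((m : Int) + 2) 0 = (c.drop 2)[m]'(by simp; omega) := by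
  rw [show (m:Int) + 2 = ((m+2 : Nat) : Int) by push_cast; ring, PySem.List.pyGetD_natCast]
  rw [List.getElem_drop, List.getD_eq_getElem c 0 (by omega)]
  congr 1; omega

-- A's inner loop computes the sum and the zero-count of the cage's cell values
theorem inner_loop (puzzle : List (List Int)) (c : List Int) (m : Nat) (hm : m + 2 ≤ c.length) :
    ∀ s z : Int,
    (PySem.List.pyRange 0 (m : Int) 1).foldl (fun (st : Int × Int) r =>
        let columnIndex := PySem.Int.mod (PySem.List.pyGetD c (r + 2) 0) 5
        let rowIndex := PySem.Int.floordiv (PySem.List.pyGetD c (r + 2) 0) 5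
        let puzzleNum := PySem.List.pyGetD (PySem.List.pyGetD puzzle rowIndex []) columnIndex 0
        (st.1 + puzzleNum, if puzzleNum == 0 then st.2 + 1 else st.2)) (s, z)
      = (s + (((c.drop 2).take m).map (cellVal puzzle)).sum,
         z + ((((c.drop 2).take m).map (cellVal puzzle)).count 0 : Int)) := by
  induction m with
  | zero => intro s z; simp
  | succ m ih =>
    intro s z
    have h0 : (0:Int) ≤ (m:Int) := by positivity
    rw [show ((m+1 : Nat) : Int) = (m : Int) + 1 by push_cast; ring,
        PySem.List.pyRange_one_succ_right h0, List.foldl_append, ih (by omega)]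
    have hlt : m < (c.drop 2).length := by simp; omega
    have htake : (c.drop 2).take (m+1) = (c.drop 2).take m ++ [(c.drop 2)[m]] :=
      (List.take_succ_eq_append_getElem hlt)
    have hget := pyGetD_drop2 c m (by omega)
    simp only [List.foldl_cons, List.foldl_nil, htake, List.map_append, List.sum_append,
      List.count_append, hget]
    have hg : cellVal puzzle (c.drop 2)[m] = PySem.List.pyGetD (PySem.List.pyGetD puzzle
        (PySem.Int.floordiv (c.drop 2)[m] 5) []) (PySem.Int.mod (c.drop 2)[m] 5) 0 := rfl
    refine Prod.ext ?_ ?_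
    · simp only [List.map_cons, List.map_nil, List.sum_cons, List.sum_nil, hg]; ring
    · simp only [List.map_cons, List.map_nil, List.count_cons, List.count_nil, hg, beq_iff_eq]
      split_ifs <;> push_cast <;> omega

-- the per-cage value list of cagePred is the cell values behind the two header entries
theorem values_eq (puzzle : List (List Int)) (c : List Int) (m : Nat) (hm : m + 2 ≤ c.length) :
    (PySem.List.pyRange 0 (m : Int) 1).map (fun r =>
      cellVal puzzle (PySem.List.pyGetD c (r + 2) 0))
      = ((c.drop 2).take m).map (cellVal puzzle) := by
  induction m with
  | zero => simp
  | succ m ih =>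
    have h0 : (0:Int) ≤ (m:Int) := by positivity
    rw [show ((m+1 : Nat) : Int) = (m : Int) + 1 by push_cast; ring,
        PySem.List.pyRange_one_succ_right h0, List.map_append, ih (by omega)]
    have hlt : m < (c.drop 2).length := by simp; omega
    have htake : (c.drop 2).take (m+1) = (c.drop 2).take m ++ [(c.drop 2)[m]] :=
      (List.take_succ_eq_append_getElem hlt)
    rw [htake, List.map_append]
    simp only [List.map_cons, List.map_nil, pyGetD_drop2 c m (by omega)]

-- A's per-cage body equals 'b && cagePred c' whenever the cage raises nothing
theorem cage_step (puzzle : List (List Int)) (c : List Int) (b : Bool)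
    (hlen : c.getD 1 0 + 2 ≤ (c.length : Int) ∨ c.getD 1 0 < 0) :
    checkAllCagesBody puzzle b c = (b && cagePred puzzle c) := by
  have hnum : PySem.List.pyGetD c 1 (0:Int) = c.getD 1 0 := by simp [pysem]
  rcases lt_or_ge (c.getD 1 0) 0 with hneg | hn0
  · have hnil : PySem.List.pyRange 0 (c.getD 1 0) 1 = [] :=
      PySem.List.pyRange_one_eq_nil (le_of_lt hneg)
    simp only [checkAllCagesBody, cagePred, hnum, hnil, List.foldl_nil, List.map_nil]
    by_cases he : PySem.List.pyGetD c 0 0 = 0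
    · simp [he]
    · simp [he, Ne.symm he]
  · obtain ⟨m, hm⟩ : ∃ m : Nat, c.getD 1 0 = (m : Int) :=
      ⟨(c.getD 1 0).toNat, (Int.toNat_of_nonneg hn0).symm⟩
    have hmlen : m + 2 ≤ c.length := by omega
    simp only [checkAllCagesBody, cagePred, hnum, hm,
      inner_loop puzzle c m hmlen 0 0, values_eq puzzle c m hmlen, Int.zero_add]
    set vals := ((c.drop 2).take m).map (cellVal puzzle) with hvals
    by_cases hmem : (0:Int) ∈ vals
    · have hpos : ¬((vals.count 0 : Int) ≤ 0) := by
        have := List.count_pos_iff.mpr hmem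
        omega
      rw [if_neg hpos]
      simp [hmem]
    · have hz : (vals.count 0 : Int) ≤ 0 := by
        simp [List.count_eq_zero.mpr hmem]
      rw [if_pos hz]
      by_cases he : PySem.List.pyGetD c 0 0 = vals.sum
      · simp [he]
      · simp only [if_pos he, Bool.false_eq, Bool.and_eq_false_iff]
        simp [Ne.symm he]
        exact Or.inr hmem

-- A's whole loop, over cages all satisfying the per-cage precondition, is the same all()
theorem fold_all (puzzle : List (List Int)) :
    ∀ (l : List (List Int)) (b : Bool),
      (∀ c ∈ l, c.getD 1 0 + 2 ≤ (c.length : Int) ∨ c.getD 1 0 < 0) →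
      l.foldl (checkAllCagesBody puzzle) b = (b && l.all (cagePred puzzle)) := by
  intro l
  induction l with
  | nil => intro b _; simp
  | cons c cs ih =>
    intro b h
    simp only [List.foldl_cons, List.all_cons]
    rw [ih _ (fun x hx => h x (by simp [hx])), cage_step puzzle c b (h c (by simp)),
      Bool.and_assoc]

-- ===== VERDICT (by name: the statement is the Claim_ definition above) =====
theorem checkAllCages_spec : Claim_equal_checkAllCages := by
  intro cages puzzle _ hpre
  unfold Spec_checkAllCages checkAllCages checkAllCages_alt
  rw [PySem.List.foldl_pyRange_zero_pyGetD' cages [] (checkAllCagesBody puzzle) true,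
    fold_all puzzle cages true (fun c hc => (hpre c hc).2.1),
    stackLoop_eq_all]
  simp
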